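-- pv_equiv track=rewrite | github.com/HazyResearch/pdftotree | pdftotree/utils/lines_utils.py | extend_horizontal_lines
-- ===== SOURCE A (Python) =====
-- TOLERANCE = 5
--
-- def extend_horizontal_lines(vertical_lines, tol=TOLERANCE):
--     heights = {}
--     for i, line in enumerate(vertical_lines):
--         try:
--             heights[(line[0], line[2])] += [i]
--         except KeyError:
--             heights[(line[0], line[2])] = [i]
--     new_horizontal_lines = []
--     for (y0, y1) in heights.keys():
--         if len(heights[(y0, y1)]) > 1:
--             lines = [vertical_lines[i] for i in heights[(y0, y1)]]
--             x0 = min([h[1] for h in lines])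
--             x1 = max([h[3] for h in lines])
--             new_horizontal_lines += [(y0, x0, y0, x1), (y1, x0, y1, x1)]
--     return new_horizontal_lines
-- ===== SOURCE B (Python) =====
-- TOLERANCE = 5
--
-- def extend_horizontal_lines(vertical_lines, tol=TOLERANCE):
--     # One streaming pass: key -> (count, running min of x0, running max of x1).
--     agg = {}
--     for (y0, x0, y1, x1) in vertical_lines:
--         r = agg.get((y0, y1))
--         agg[(y0, y1)] = (1, x0, x1) if r is None else (r[0] + 1, min(r[1], x0), max(r[2], x1))
--     out = []
--     for (y0, y1), (c, mn, mx) in agg.items():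
--         if c > 1:
--             out.append((y0, mn, y0, mx))
--             out.append((y1, mn, y1, mx))
--     return out
-- ===== Notes on version B (the rewrite author's own statement) =====
-- stated objective: alternative
-- what changed: Replaces A's collect-then-aggregate (dict of index lists, then a second per-group pass re-indexing vertical_lines and computing min/max) with a single streaming pass keeping (count, running min x0, running max x1) per key, then one emit loop over the dict items.
import Mathlib
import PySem

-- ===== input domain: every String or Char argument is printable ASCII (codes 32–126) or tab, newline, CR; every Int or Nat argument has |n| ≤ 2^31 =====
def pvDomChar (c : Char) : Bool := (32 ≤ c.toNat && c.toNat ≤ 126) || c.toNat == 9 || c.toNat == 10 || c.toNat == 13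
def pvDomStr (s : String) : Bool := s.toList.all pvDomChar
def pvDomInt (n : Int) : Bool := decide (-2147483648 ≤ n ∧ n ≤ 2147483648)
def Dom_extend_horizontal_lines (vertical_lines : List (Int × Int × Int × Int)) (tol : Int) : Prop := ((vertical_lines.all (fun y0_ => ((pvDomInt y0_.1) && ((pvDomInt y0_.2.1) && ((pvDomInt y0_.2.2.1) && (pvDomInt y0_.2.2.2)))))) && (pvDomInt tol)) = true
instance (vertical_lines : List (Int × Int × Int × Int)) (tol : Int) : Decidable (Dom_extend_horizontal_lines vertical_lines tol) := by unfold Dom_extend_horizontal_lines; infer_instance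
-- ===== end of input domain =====

-- B replaces A's collect-then-aggregate (index lists per key, then a per-group re-scan of vertical_lines)
-- with one streaming pass keeping (count, min x0, max x1) per key; alternative decomposition, same results.


-- ===== PORT A =====
def extend_horizontal_lines (vertical_lines : List (Int × Int × Int × Int)) (tol : Int) : List (Int × Int × Int × Int) :=
  let heights : PySem.Dict (Int × Int) (List Int) :=
    (PySem.List.enumerate vertical_lines).foldl
      (fun d p => d.modify (p.2.1, p.2.2.2.1) [] (fun s => s ++ [p.1])) PySem.Dict.empty
  heights.keys.foldl (fun acc k =>
    let is := heights.getD k []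
    if is.length > 1 then
      -- vertical_lines[i]: every i comes from enumerate, so the index is in range (Python never raises here)
      let lines := is.map (fun i => (PySem.List.pyGet? vertical_lines i).getD (0, 0, 0, 0))
      let x0 := (PySem.List.min? (lines.map (fun h => h.2.1)) (fun x => x)).getD 0
      let x1 := (PySem.List.max? (lines.map (fun h => h.2.2.2)) (fun x => x)).getD 0
      acc ++ [(k.1, x0, k.1, x1), (k.2, x0, k.2, x1)]
    else acc) []

-- ===== PORT B =====
def extend_horizontal_lines_alt (vertical_lines : List (Int × Int × Int × Int)) (tol : Int) : List (Int × Int × Int × Int) :=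
  let agg : PySem.Dict (Int × Int) (Int × Int × Int) :=
    vertical_lines.foldl (fun d l =>
      d.insert (l.1, l.2.2.1)
        (match d.get? (l.1, l.2.2.1) with
         | none => (1, l.2.1, l.2.2.2)
         | some r => (r.1 + 1, min r.2.1 l.2.1, max r.2.2 l.2.2.2))) PySem.Dict.empty
  agg.items.foldl (fun acc p =>
    if p.2.1 > 1 then
      acc ++ [(p.1.1, p.2.2.1, p.1.1, p.2.2.2), (p.1.2, p.2.2.1, p.1.2, p.2.2.2)]
    else acc) []

-- ===== PRECONDITION & SPEC =====
def Spec_extend_horizontal_lines (vertical_lines : List (Int × Int × Int × Int)) (tol : Int) (out : List (Int × Int × Int × Int)) : Prop := out = extend_horizontal_lines_alt vertical_lines tol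
instance (vertical_lines : List (Int × Int × Int × Int)) (tol : Int) (out : List (Int × Int × Int × Int)) : Decidable (Spec_extend_horizontal_lines vertical_lines tol out) := by unfold Spec_extend_horizontal_lines; infer_instance

-- ===== CLAIM (what is proved, stated in full; the proofs are below) =====
def Claim_equal_extend_horizontal_lines : Prop := ∀ (vertical_lines : List (Int × Int × Int × Int)) (tol : Int), Dom_extend_horizontal_lines vertical_lines tol → Spec_extend_horizontal_lines vertical_lines tol (extend_horizontal_lines vertical_lines tol)

-- ===== LEMMAS AND PROOFS =====

-- key of a vertical line and the group of lines sharing a key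
def pvKey (l : Int × Int × Int × Int) : Int × Int := (l.1, l.2.2.1)
def pvGrp (vl : List (Int × Int × Int × Int)) (k : Int × Int) : List (Int × Int × Int × Int) :=
  vl.filter (fun l => pvKey l == k)
-- B's per-key combining step
def pvG (o : Option (Int × Int × Int)) (l : Int × Int × Int × Int) : Int × Int × Int :=
  match o with
  | none => (1, l.2.1, l.2.2.2)
  | some r => (r.1 + 1, min r.2.1 l.2.1, max r.2.2 l.2.2.2)

-- A's phase-1 dict maps k to the indices of the lines with key k, in order
lemma pv_dictA_getD (vl : List (Int × Int × Int × Int)) (k : Int × Int) :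
    (((PySem.List.enumerate vl).foldl
      (fun d p => d.modify (p.2.1, p.2.2.2.1) [] (fun s => s ++ [p.1])) PySem.Dict.empty).getD k [])
    = ((PySem.List.enumerate vl).filter (fun p => pvKey p.2 == k)).map (·.1) := by
  have h1 : (PySem.List.enumerate vl).foldl
      (fun d p => d.modify (p.2.1, p.2.2.2.1) [] (fun s => s ++ [p.1])) PySem.Dict.empty
      = ((PySem.List.enumerate vl).map (fun p => ((p.2.1, p.2.2.2.1), p.1))).foldl
          (fun d q => d.modify q.1 [] (fun s => s ++ [q.2])) PySem.Dict.empty := by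
    rw [List.foldl_map]
  rw [h1, PySem.Dict.getD_foldl_modify_append, PySem.Dict.getD_empty, List.filter_map, List.map_map]
  simp only [Function.comp_def, pvKey, List.nil_append]

lemma enum_filter_map_snd (q : (Int × Int × Int × Int) → Bool) :
    ∀ (vl : List (Int × Int × Int × Int)) (s : Int),
    ((PySem.List.enumerate vl s).filter (fun p => q p.2)).map (·.2) = vl.filter q := by
  intro vl
  induction vl with
  | nil => intro s; simp [PySem.List.enumerate_nil]
  | cons h t ih =>
    intro s
    rw [PySem.List.enumerate_cons]
    by_cases hq : q h
    · simp [hq, ih]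
    · simp [hq, ih]

-- re-indexing vertical_lines by the stored indices yields exactly the group
lemma pv_lines_eq (vl : List (Int × Int × Int × Int)) (k : Int × Int) :
    (((PySem.List.enumerate vl).filter (fun p => pvKey p.2 == k)).map (·.1)).map
      (fun i => (PySem.List.pyGet? vl i).getD (0, 0, 0, 0)) = pvGrp vl k := by
  rw [List.map_map]
  simp only [pvGrp]
  rw [← enum_filter_map_snd (fun l => pvKey l == k) vl 0]
  apply List.map_congr_left
  intro p hp
  have hmem : p ∈ PySem.List.enumerate vl 0 := List.mem_of_mem_filter hp
  rw [PySem.List.mem_enumerate_iff] at hmem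
  obtain ⟨j, hj, rfl⟩ := hmem
  simp [Function.comp, PySem.List.pyGet?_natCast, List.getElem?_eq_getElem hj]

-- B's phase-1 lookup is the fold of pvG over the key's group
lemma pv_dictB_get? : ∀ (l : List (Int × Int × Int × Int)) (d : PySem.Dict (Int × Int) (Int × Int × Int)) (k : Int × Int),
    (l.foldl (fun d l =>
      d.insert (l.1, l.2.2.1)
        (match d.get? (l.1, l.2.2.1) with
         | none => (1, l.2.1, l.2.2.2)
         | some r => (r.1 + 1, min r.2.1 l.2.1, max r.2.2 l.2.2.2))) d).get? k
    = (l.filter (fun x => pvKey x == k)).foldl (fun o x => some (pvG o x)) (d.get? k) := by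
  intro l
  induction l with
  | nil => intro d k; simp
  | cons h t ih =>
    intro d k
    rw [List.foldl_cons, ih, List.filter_cons]
    by_cases hk : pvKey h = k
    · simp only [pvKey] at hk
      simp [hk, pvG, pvKey]
    · have hne : ((h.1, h.2.2.1) : Int × Int) ≠ k := by simpa [pvKey] using hk
      simp only [pvKey, beq_iff_eq, hne]
      rw [PySem.Dict.get?_insert_of_ne _ _ (Ne.symm hne)]
      simp

-- folding pvG from a known record gives count / running min / running max in closed form
lemma pv_aggOpt_closed : ∀ (gl : List (Int × Int × Int × Int)) (r : Int × Int × Int),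
    gl.foldl (fun o x => some (pvG o x)) (some r)
    = some (r.1 + (gl.length : Int),
            gl.foldl (fun m x => min m x.2.1) r.2.1,
            gl.foldl (fun m x => max m x.2.2.2) r.2.2) := by
  intro gl
  induction gl with
  | nil => intro r; simp
  | cons h t ih =>
    intro r
    rw [List.foldl_cons]
    rw [ih]
    simp only [pvG, List.length_cons, Option.some.injEq, Prod.mk.injEq]
    refine ⟨by push_cast; ring, rfl, rfl⟩

lemma pv_main (vl : List (Int × Int × Int × Int)) (tol : Int) :
    extend_horizontal_lines vl tol = extend_horizontal_lines_alt vl tol := by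
  unfold extend_horizontal_lines extend_horizontal_lines_alt
  set dA := (PySem.List.enumerate vl).foldl
      (fun d p => d.modify (p.2.1, p.2.2.2.1) [] (fun s => s ++ [p.1])) PySem.Dict.empty with hdA
  set dB : PySem.Dict (Int × Int) (Int × Int × Int) := vl.foldl (fun d l =>
      d.insert (l.1, l.2.2.1)
        (match d.get? (l.1, l.2.2.1) with
         | none => (1, l.2.1, l.2.2.2)
         | some r => (r.1 + 1, min r.2.1 l.2.1, max r.2.2 l.2.2.2))) PySem.Dict.empty with hdB
  have hmapkey : (PySem.List.enumerate vl).map (fun p => ((p.2.1, p.2.2.2.1) : Int × Int))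
      = vl.map pvKey := by
    have := PySem.List.map_snd_enumerate vl 0
    calc (PySem.List.enumerate vl).map (fun p => ((p.2.1, p.2.2.2.1) : Int × Int))
        = ((PySem.List.enumerate vl).map (·.2)).map pvKey := by
          rw [List.map_map]; rfl
      _ = vl.map pvKey := by rw [this]
  have hkeysA : dA.keys = PySem.Set.ofList (vl.map pvKey) := by
    have h0 := PySem.Dict.keys_foldl_modify_key (PySem.List.enumerate vl)
      (fun p => ((p.2.1, p.2.2.2.1) : Int × Int)) ([] : List Int)
      (fun _ p s => s ++ [p.1]) PySem.Dict.empty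
    rw [hmapkey] at h0
    rw [hdA]
    exact h0.trans rfl
  have hkeysB : dB.keys = PySem.Set.ofList (vl.map pvKey) := by
    have h0 := PySem.Dict.keys_foldl_insert_key vl pvKey
      (fun (d : PySem.Dict (Int × Int) (Int × Int × Int)) l =>
        match d.get? (l.1, l.2.2.1) with
         | none => (1, l.2.1, l.2.2.2)
         | some r => (r.1 + 1, min r.2.1 l.2.1, max r.2.2 l.2.2.2)) PySem.Dict.empty
    rw [hdB]
    exact h0.trans rfl
  have hndB : dB.keys.Nodup := by
    rw [hkeysB]; exact PySem.Set.nodup_ofList _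
  show List.foldl (fun acc k =>
      let is := dA.getD k []
      if is.length > 1 then
        let lines := is.map (fun i => (PySem.List.pyGet? vl i).getD (0, 0, 0, 0))
        let x0 := (PySem.List.min? (lines.map (fun h => h.2.1)) (fun x => x)).getD 0
        let x1 := (PySem.List.max? (lines.map (fun h => h.2.2.2)) (fun x => x)).getD 0
        acc ++ [(k.1, x0, k.1, x1), (k.2, x0, k.2, x1)]
      else acc) [] dA.keys
    = List.foldl (fun acc p =>
        if p.2.1 > 1 then
          acc ++ [(p.1.1, p.2.2.1, p.1.1, p.2.2.2), (p.1.2, p.2.2.1, p.1.2, p.2.2.2)]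
        else acc) [] dB.items
  rw [PySem.Dict.items_eq_map_keys dB hndB (0, 0, 0), List.foldl_map, hkeysA, hkeysB]
  apply PySem.List.foldl_congr_mem
  intro acc k hk
  simp only []
  -- the group of k is nonempty since k is a key
  have hkmem : k ∈ vl.map pvKey := (PySem.Set.mem_ofList _ k).mp hk
  have hgrp_ne : pvGrp vl k ≠ [] := by
    obtain ⟨l, hl, rfl⟩ := List.mem_map.mp hkmem
    intro hnil
    have : l ∈ pvGrp vl (pvKey l) := List.mem_filter.mpr ⟨hl, by simp⟩
    rw [hnil] at this; exact absurd this (List.not_mem_nil)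
  obtain ⟨h, t, hht⟩ := List.exists_cons_of_ne_nil hgrp_ne
  -- A-side facts
  have hA : dA.getD k [] = ((PySem.List.enumerate vl).filter (fun p => pvKey p.2 == k)).map (·.1) :=
    pv_dictA_getD vl k
  have hlen : (dA.getD k []).length = (pvGrp vl k).length := by
    rw [hA, ← pv_lines_eq vl k]
    simp
  -- B-side value
  have hBval : dB.getD k (0, 0, 0)
      = (1 + (t.length : Int),
         t.foldl (fun m x => min m x.2.1) h.2.1,
         t.foldl (fun m x => max m x.2.2.2) h.2.2.2) := by
    have hget : dB.get? k = (pvGrp vl k).foldl (fun o x => some (pvG o x)) none := by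
      rw [hdB, pv_dictB_get? vl PySem.Dict.empty k, PySem.Dict.get?_empty]; rfl
    rw [hht] at hget
    rw [List.foldl_cons] at hget
    have h1 : pvG none h = (1, h.2.1, h.2.2.2) := rfl
    rw [h1, pv_aggOpt_closed] at hget
    rw [PySem.Dict.getD_eq_get?_getD, hget]
    rfl
  simp only [hBval]
  have hlen2 : (dA.getD k []).length = t.length + 1 := by rw [hlen, hht]; simp
  by_cases ht : t = []
  · subst ht
    rw [if_neg (by rw [hlen2]; simp), if_neg (by simp)]
  · have htpos : 0 < t.length := List.length_pos_iff.mpr ht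
    rw [if_pos (by rw [hlen2]; omega), if_pos (by omega)]
    have hlines : (dA.getD k []).map (fun i => (PySem.List.pyGet? vl i).getD (0, 0, 0, 0))
        = pvGrp vl k := by rw [hA]; exact pv_lines_eq vl k
    rw [hlines, hht]
    have hmin : (PySem.List.min? ((h :: t).map (fun h => h.2.1)) (fun x => x)).getD 0
        = t.foldl (fun m x => min m x.2.1) h.2.1 := by
      rw [List.map_cons, PySem.List.min?_id_cons, Option.getD_some, List.foldl_map]
    have hmax : (PySem.List.max? ((h :: t).map (fun h => h.2.2.2)) (fun x => x)).getD 0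
        = t.foldl (fun m x => max m x.2.2.2) h.2.2.2 := by
      rw [List.map_cons, PySem.List.max?_id_cons, Option.getD_some, List.foldl_map]
    rw [hmin, hmax]

-- ===== VERDICT (by name: the statement is the Claim_ definition above) =====
theorem extend_horizontal_lines_spec : Claim_equal_extend_horizontal_lines := by
  intro vl tol _
  exact pv_main vl tol
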